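-- pv_equiv track=rewrite | github.com/ChuhanXU/LeetCode | Robinhood/newTextEditor.py | undo
-- ===== SOURCE A (Python) =====
-- def undo(i,operation,operations,text,insertNumber,deleteCharacter,pasteNumber):
--     if operation[0] == "I":
--         lengthOfText = len(text)
--         text = text[0:lengthOfText - insertNumber]
--     elif operation[0] == "D":
--         text = text + deleteCharacter
--
--     elif operation[0] == "P":
--         lengthOfText = len(text)
--         text = text[0:lengthOfText - pasteNumber]
--     elif operation[0] == "C":
--         text = undo(i-1,operations[i-1],operations,text,insertNumber,deleteCharacter,pasteNumber)
--
--     return text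
-- ===== SOURCE B (Python) =====
-- def undo(i, operation, operations, text, insertNumber, deleteCharacter, pasteNumber):
--     # Iterative: walk the C-chain backwards, then apply the single undo action.
--     while operation[0] == "C":
--         i -= 1
--         operation = operations[i]
--     if operation[0] == "I":
--         return text[:len(text) - insertNumber]
--     if operation[0] == "D":
--         return text + deleteCharacter
--     if operation[0] == "P":
--         return text[:len(text) - pasteNumber]
--     return text
-- ===== Notes on version B (the rewrite author's own statement) =====
-- stated objective: simpler
-- what changed: Replaces A's self-recursion on the C (copy/redo-chain) branch with an iterative backward walk over the operation chain followed by a single flat dispatch of the one real undo action.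
import Mathlib
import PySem

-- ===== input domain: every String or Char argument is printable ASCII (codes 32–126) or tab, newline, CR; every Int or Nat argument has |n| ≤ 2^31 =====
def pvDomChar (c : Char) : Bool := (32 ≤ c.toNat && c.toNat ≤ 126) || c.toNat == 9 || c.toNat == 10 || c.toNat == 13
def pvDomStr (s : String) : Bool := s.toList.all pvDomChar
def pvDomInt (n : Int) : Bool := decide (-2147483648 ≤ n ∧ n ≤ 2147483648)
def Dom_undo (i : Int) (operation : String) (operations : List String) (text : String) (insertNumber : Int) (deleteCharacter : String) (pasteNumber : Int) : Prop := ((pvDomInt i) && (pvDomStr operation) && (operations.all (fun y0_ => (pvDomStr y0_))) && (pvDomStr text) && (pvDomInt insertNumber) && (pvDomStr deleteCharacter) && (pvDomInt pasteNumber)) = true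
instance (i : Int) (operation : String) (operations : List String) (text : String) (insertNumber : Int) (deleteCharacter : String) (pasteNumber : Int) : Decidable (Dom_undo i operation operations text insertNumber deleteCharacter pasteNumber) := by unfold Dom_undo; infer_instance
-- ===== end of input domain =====

-- B replaces A's recursion on the "C" branch with an iterative backward walk plus one flat dispatch (objective: simpler).

-- ===== PORT A =====
-- helper for the termination measure of the literal recursion: a successful Python
-- index read operations[i-1] implies -len ≤ i-1, so (i + len).toNat decreases.
theorem pvGetSomeInRange {α : Type} (xs : List α) (j : Int) (x : α)
    (h : PySem.List.pyGet? xs j = some x) : -(xs.length : Int) ≤ j ∧ j < xs.length := by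
  by_contra hc
  rw [(PySem.List.pyGet?_eq_none_iff xs j).mpr (by simpa [PySem.Raise.InRange] using hc)] at h
  simp at h

def undo (i : Int) (operation : String) (operations : List String) (text : String) (insertNumber : Int) (deleteCharacter : String) (pasteNumber : Int) : String :=
  match operation.toList with
  | [] => text  -- Python raises IndexError on operation[0]; excluded by Pre_undo
  | c :: _ =>
    if c = 'I' then PySem.Str.slice text (some 0) (some (PySem.Str.len text - insertNumber))
    else if c = 'D' then text ++ deleteCharacter
    else if c = 'P' then PySem.Str.slice text (some 0) (some (PySem.Str.len text - pasteNumber))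
    else if c = 'C' then
      match h : PySem.List.pyGet? operations (i - 1) with
      | none => text  -- Python raises IndexError on operations[i-1]; excluded by Pre_undo
      | some op' => undo (i - 1) op' operations text insertNumber deleteCharacter pasteNumber
    else text
termination_by (i + operations.length).toNat
decreasing_by
  have := pvGetSomeInRange operations (i - 1) op' h
  omega

-- ===== PORT B =====
-- the while-loop of Source B: step i backwards while the current operation starts with 'C'
def resolveC (i : Int) (operation : String) (operations : List String) : String :=
  if operation.toList.head? = some 'C' then
    match h : PySem.List.pyGet? operations (i - 1) with
    | none => operation  -- Python raises IndexError on operations[i]; excluded by Pre_undo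
    | some op' => resolveC (i - 1) op' operations
  else operation
termination_by (i + operations.length).toNat
decreasing_by
  have := pvGetSomeInRange operations (i - 1) op' h
  omega

-- the flat dispatch of Source B after the loop
def applyUndo (operation : String) (text : String) (insertNumber : Int) (deleteCharacter : String) (pasteNumber : Int) : String :=
  match operation.toList with
  | [] => text  -- Python raises IndexError on operation[0]; excluded by Pre_undo
  | c :: _ =>
    if c = 'I' then PySem.Str.slice text (some 0) (some (PySem.Str.len text - insertNumber))
    else if c = 'D' then text ++ deleteCharacter
    else if c = 'P' then PySem.Str.slice text (some 0) (some (PySem.Str.len text - pasteNumber))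
    else text

def undo_alt (i : Int) (operation : String) (operations : List String) (text : String) (insertNumber : Int) (deleteCharacter : String) (pasteNumber : Int) : String :=
  applyUndo (resolveC i operation operations) text insertNumber deleteCharacter pasteNumber

-- ===== PRECONDITION & SPEC =====
-- per-index predicates on the input used by Pre_undo's bounded quantifiers
def chainStepC (ops : List String) (j : Int) : Bool :=
  match PySem.List.pyGet? ops j with
  | some s => match s.toList with | 'C' :: _ => true | _ => false
  | none => false

def chainStepStop (ops : List String) (j : Int) : Bool :=
  match PySem.List.pyGet? ops j with
  | some s => match s.toList with | [] => false | 'C' :: _ => false | _ => true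
  | none => false

-- Pre_undo = exactly the inputs where the Python A returns: operation nonempty, and if it
-- starts with 'C', the backward chain operations[i-1], operations[i-2], … (Python negative
-- indices wrapping) stays in range and nonempty until it reaches a non-'C' operation.
def Pre_undo (i : Int) (operation : String) (operations : List String) (text : String) (insertNumber : Int) (deleteCharacter : String) (pasteNumber : Int) : Prop :=
  operation ≠ "" ∧
  (operation.toList.head? = some 'C' →
    -(operations.length : Int) ≤ i - 1 ∧ i - 1 < (operations.length : Int) ∧
    ∃ k < 2 * operations.length,
      (∀ m < k, chainStepC operations (i - 1 - m) = true) ∧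
      chainStepStop operations (i - 1 - k) = true)

instance (i : Int) (operation : String) (operations : List String) (text : String) (insertNumber : Int) (deleteCharacter : String) (pasteNumber : Int) : Decidable (Pre_undo i operation operations text insertNumber deleteCharacter pasteNumber) := by unfold Pre_undo; infer_instance

def pvWitness_undo : Int × String × List String × String × Int × String × Int :=
  (1, "C", ["D"], "ab", 1, "x", 1)

def Spec_undo (i : Int) (operation : String) (operations : List String) (text : String) (insertNumber : Int) (deleteCharacter : String) (pasteNumber : Int) (out : String) : Prop := out = undo_alt i operation operations text insertNumber deleteCharacter pasteNumber
instance (i : Int) (operation : String) (operations : List String) (text : String) (insertNumber : Int) (deleteCharacter : String) (pasteNumber : Int) (out : String) : Decidable (Spec_undo i operation operations text insertNumber deleteCharacter pasteNumber out) := by unfold Spec_undo; infer_instance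

-- ===== CLAIM (what is proved, stated in full; the proofs are below) =====
def Claim_equal_undo : Prop := ∀ (i : Int) (operation : String) (operations : List String) (text : String) (insertNumber : Int) (deleteCharacter : String) (pasteNumber : Int), Dom_undo i operation operations text insertNumber deleteCharacter pasteNumber → Pre_undo i operation operations text insertNumber deleteCharacter pasteNumber → Spec_undo i operation operations text insertNumber deleteCharacter pasteNumber (undo i operation operations text insertNumber deleteCharacter pasteNumber)

-- ===== LEMMAS AND PROOFS =====
-- the two ports agree on every input (Pre_undo not even needed for the equality)
-- one-step unfoldings of the while-loop of Source B
theorem resolveC_done (i : Int) (op : String) (ops : List String)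
    (hh : ¬ op.toList.head? = some 'C') : resolveC i op ops = op := by
  rw [resolveC, if_neg hh]

theorem resolveC_stuck (i : Int) (op : String) (ops : List String)
    (hh : op.toList.head? = some 'C') (hg : PySem.List.pyGet? ops (i - 1) = none) :
    resolveC i op ops = op := by
  rw [resolveC, if_pos hh]
  split
  · rfl
  · rename_i o h; rw [hg] at h; cases h

theorem resolveC_step (i : Int) (op op' : String) (ops : List String)
    (hh : op.toList.head? = some 'C') (hg : PySem.List.pyGet? ops (i - 1) = some op') :
    resolveC i op ops = resolveC (i - 1) op' ops := by
  rw [resolveC, if_pos hh]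
  split
  · rename_i h; rw [hg] at h; cases h
  · rename_i o h; rw [hg] at h; injection h with e; subst e; rfl

-- the two ports agree on every input (Pre_undo is not even needed for the equality)
theorem undo_eq_alt (i : Int) (operation : String) (operations : List String) (text : String) (insertNumber : Int) (deleteCharacter : String) (pasteNumber : Int) :
    undo i operation operations text insertNumber deleteCharacter pasteNumber =
      applyUndo (resolveC i operation operations) text insertNumber deleteCharacter pasteNumber := by
  fun_induction undo i operation operations text insertNumber deleteCharacter pasteNumber with
  | case1 i op heq =>
    rw [resolveC_done _ _ _ (by simp [heq])]
    simp [applyUndo, heq]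
  | case2 i op tl heq =>
    rw [resolveC_done _ _ _ (by simp [heq])]
    simp [applyUndo, heq]
  | case3 i op tl heq =>
    rw [resolveC_done _ _ _ (by simp [heq])]
    simp [applyUndo, heq]
  | case4 i op tl heq =>
    rw [resolveC_done _ _ _ (by simp [heq])]
    simp [applyUndo, heq]
  | case5 i op tl hget heq _ _ _ =>
    rw [resolveC_stuck _ _ _ (by simp [heq]) hget]
    simp [applyUndo, heq]
  | case6 i op tl op' hget heq _ _ _ ih =>
    rw [resolveC_step _ _ _ _ (by simp [heq]) hget]
    exact ih
  | case7 i op c tl heq hI hD hP hC =>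
    rw [resolveC_done _ _ _ (by simp [heq, hC])]
    simp [applyUndo, heq, hI, hD, hP]

-- ===== VERDICT (by name: the statement is the Claim_ definition above) =====
theorem undo_spec : Claim_equal_undo := by
  intro i operation operations text insertNumber deleteCharacter pasteNumber _ _
  unfold Spec_undo undo_alt
  exact undo_eq_alt i operation operations text insertNumber deleteCharacter pasteNumber
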